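-- pv_equiv track=rewrite | github.com/pavlos-nikou/acsc430Lab-Dynamic-Languages | Lab04/Lab04b.py | is_nneg_float
-- ===== SOURCE A (Python) =====
-- def is_nneg_float(s):
--     hasAtLeastOneDigit = False
--     for char in s:
--         if char.isdigit() == False:
--             if char != ".":
--                 return False
--         else:
--             hasAtLeastOneDigit = True
--
--     if hasAtLeastOneDigit: return True
--
--     return False
-- ===== SOURCE B (Python) =====
-- def is_nneg_float(s):
--     return s.replace('.', '').isdigit()
-- ===== Notes on version B (the rewrite author's own statement) =====
-- stated objective: idiomatic
-- what changed: Replaced the character-by-character scan with a boolean flag by a transform-then-validate one-liner: strip all dots with str.replace and test the remainder with str.isdigit (empty string is not a digit string, covering the all-dots/empty cases).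
import Mathlib
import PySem

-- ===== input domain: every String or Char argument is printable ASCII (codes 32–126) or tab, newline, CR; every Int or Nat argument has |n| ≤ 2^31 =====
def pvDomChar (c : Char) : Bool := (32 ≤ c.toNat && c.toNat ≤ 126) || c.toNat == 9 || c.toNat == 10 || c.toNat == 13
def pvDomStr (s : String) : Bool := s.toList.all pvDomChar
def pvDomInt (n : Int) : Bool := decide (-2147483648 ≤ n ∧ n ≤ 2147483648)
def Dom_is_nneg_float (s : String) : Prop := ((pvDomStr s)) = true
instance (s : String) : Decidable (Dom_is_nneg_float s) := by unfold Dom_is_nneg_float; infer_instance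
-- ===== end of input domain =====

-- B replaces A's per-character scan with a flag by the idiomatic s.replace('.', '').isdigit().

-- ===== PORT A =====
-- the for-loop with early 'return False' and the hasAtLeastOneDigit flag
def isNnegFloatLoop : List Char → Bool → Bool
  | [], hasDigit => hasDigit
  | c :: rest, hasDigit =>
    if PySem.Chars.isdigit c = false then
      if c ≠ '.' then false else isNnegFloatLoop rest hasDigit
    else isNnegFloatLoop rest true

def is_nneg_float (s : String) : Bool := isNnegFloatLoop s.toList false

-- ===== PORT B =====
def is_nneg_float_alt (s : String) : Bool :=
  PySem.Str.strIsdigit (PySem.Str.replace s "." "")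

-- ===== PRECONDITION & SPEC =====
def Spec_is_nneg_float (s : String) (out : Bool) : Prop := out = is_nneg_float_alt s
instance (s : String) (out : Bool) : Decidable (Spec_is_nneg_float s out) := by unfold Spec_is_nneg_float; infer_instance

-- ===== CLAIM (what is proved, stated in full; the proofs are below) =====
def Claim_equal_is_nneg_float : Prop := ∀ (s : String), Dom_is_nneg_float s → Spec_is_nneg_float s (is_nneg_float s)

-- ===== LEMMAS AND PROOFS =====

-- A's loop characterised: all chars are digit-or-dot, and (flag already set or some digit seen)
lemma isNnegFloatLoop_eq (cs : List Char) (flag : Bool) :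
    isNnegFloatLoop cs flag =
      ((flag || cs.any PySem.Chars.isdigit) &&
        cs.all (fun c => PySem.Chars.isdigit c || c == '.')) := by
  induction cs generalizing flag with
  | nil => simp [isNnegFloatLoop]
  | cons c rest ih =>
    by_cases hd : PySem.Chars.isdigit c = true
    · simp [isNnegFloatLoop, hd, ih]
    · simp only [Bool.not_eq_true] at hd
      by_cases hc : c = '.'
      · subst hc
        simp [isNnegFloatLoop, ih, PySem.Chars.isdigit]
      · simp [isNnegFloatLoop, hd, hc]

-- replace.go with pattern "." and empty replacement is a dot filter
lemma replace_go_dot (fuel : Nat) (l acc : List Char) (h : l.length ≤ fuel) :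
    PySem.Chars.replace.go ['.'] [] fuel l acc =
      acc.reverse ++ l.filter (fun c => !(c == '.')) := by
  induction fuel generalizing l acc with
  | zero =>
    have : l = [] := by
      cases l with
      | nil => rfl
      | cons a t => simp at h
    subst this
    simp [PySem.Chars.replace.go]
  | succ fuel ih =>
    cases l with
    | nil => simp [PySem.Chars.replace.go]
    | cons c t =>
      by_cases hc : c = '.'
      · subst hc
        have hp : List.isPrefixOf ['.'] ('.' :: t) = true := by
          simp [List.isPrefixOf]
        simp only [PySem.Chars.replace.go, hp, if_true]
        have hred : PySem.Chars.replace.go ['.'] [] fuel (List.drop ['.'].length ('.' :: t)) (([] : List Char).reverse ++ acc) = PySem.Chars.replace.go ['.'] [] fuel t acc := rfl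
        rw [hred, ih t acc (by simpa using Nat.le_of_succ_le_succ h)]
        simp
      · have hp : List.isPrefixOf ['.'] (c :: t) = false := by
          simp [List.isPrefixOf]
          exact fun hh => absurd hh.symm hc
        simp only [PySem.Chars.replace.go, hp]
        rw [if_neg (by simp)]
        rw [ih t (c :: acc) (by simpa using Nat.le_of_succ_le_succ h)]
        simp [hc]

lemma replace_dot (cs : List Char) :
    PySem.Chars.replace cs ['.'] [] = cs.filter (fun c => !(c == '.')) := by
  have := replace_go_dot cs.length cs [] (le_refl _)
  simpa [PySem.Chars.replace] using this

lemma dot_not_digit : PySem.Chars.isdigit '.' = false := by decide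

-- ===== VERDICT (by name: the statement is the Claim_ definition above) =====
theorem is_nneg_float_spec : Claim_equal_is_nneg_float := by
  intro s _
  unfold Spec_is_nneg_float is_nneg_float is_nneg_float_alt
  rw [isNnegFloatLoop_eq]
  rw [PySem.Str.strIsdigit_eq, PySem.Str.toList_replace]
  have hrep : ("." : String).toList = ['.'] := by decide
  have hemp : ("" : String).toList = [] := by decide
  rw [hrep, hemp, replace_dot]
  set cs := s.toList with hcs
  unfold PySem.Chars.strIsdigit
  induction cs with
  | nil => simp
  | cons c t ih =>
    by_cases hc : c = '.'
    · subst hc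
      rw [show List.filter (fun c => !(c == '.')) ('.' :: t) = List.filter (fun c => !(c == '.')) t from by simp]
      simp only [List.any_cons, List.all_cons, dot_not_digit]
      simpa using ih
    · by_cases hd : PySem.Chars.isdigit c = true
      · simp only [List.filter_cons]
        rw [if_pos (by simp [hc])]
        simp only [List.any_cons, List.all_cons, hd]
        simp [Bool.or_comm]
      · simp only [Bool.not_eq_true] at hd
        simp only [List.filter_cons]
        rw [if_pos (by simp [hc])]
        simp only [List.any_cons, List.all_cons, hd]
        simp [hc, Bool.or_comm]
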